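-- pv_equiv track=rewrite | github.com/shimeon8129/investment-os | reporting/daily_decision_dashboard.py | build_market_state_section
-- ===== SOURCE A (Python) =====
-- def build_market_state_section(candidates: list) -> str:
--     """
--     Dashboard v0 does not infer true market regime.
--     It only summarizes candidate signal distribution.
--     """
--     signal_counts = {}
--
--     for row in candidates:
--         signal = str(row.get("signal", "UNKNOWN"))
--         signal_counts[signal] = signal_counts.get(signal, 0) + 1
--
--     lines = [
--         "## 1. Market / Signal State",
--         "",
--         "Dashboard v0 does not make a new market regime decision.",
--         "It summarizes current candidate output only.",
--         "",
--         "### Candidate Signal Counts",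
--         "",
--     ]
--
--     if signal_counts:
--         for signal, count in sorted(signal_counts.items()):
--             lines.append(f"- {signal}: {count}")
--     else:
--         lines.append("- No candidates found")
--
--     return "\n".join(lines)
-- ===== SOURCE B (Python) =====
-- def build_market_state_section(candidates: list) -> str:
--     lines = [
--         "## 1. Market / Signal State",
--         "",
--         "Dashboard v0 does not make a new market regime decision.",
--         "It summarizes current candidate output only.",
--         "",
--         "### Candidate Signal Counts",
--         "",
--     ]
--
--     signals = sorted(str(row.get("signal", "UNKNOWN")) for row in candidates)
--
--     runs = []
--     if signals:
--         cur, cnt = signals[0], 1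
--         for s in signals[1:]:
--             if s == cur:
--                 cnt += 1
--             else:
--                 runs.append((cur, cnt))
--                 cur, cnt = s, 1
--         runs.append((cur, cnt))
--
--     if runs:
--         for sig, c in runs:
--             lines.append(f"- {sig}: {c}")
--     else:
--         lines.append("- No candidates found")
--
--     return "\n".join(lines)
-- ===== Notes on version B (the rewrite author's own statement) =====
-- stated objective: alternative
-- what changed: Replaces A's hash-map count accumulation followed by sorting the (signal,count) items with a sort-all-signals-then-group-adjacent-runs pass (run lengths become the counts); header and empty-case branch kept verbatim.
import Mathlib
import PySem

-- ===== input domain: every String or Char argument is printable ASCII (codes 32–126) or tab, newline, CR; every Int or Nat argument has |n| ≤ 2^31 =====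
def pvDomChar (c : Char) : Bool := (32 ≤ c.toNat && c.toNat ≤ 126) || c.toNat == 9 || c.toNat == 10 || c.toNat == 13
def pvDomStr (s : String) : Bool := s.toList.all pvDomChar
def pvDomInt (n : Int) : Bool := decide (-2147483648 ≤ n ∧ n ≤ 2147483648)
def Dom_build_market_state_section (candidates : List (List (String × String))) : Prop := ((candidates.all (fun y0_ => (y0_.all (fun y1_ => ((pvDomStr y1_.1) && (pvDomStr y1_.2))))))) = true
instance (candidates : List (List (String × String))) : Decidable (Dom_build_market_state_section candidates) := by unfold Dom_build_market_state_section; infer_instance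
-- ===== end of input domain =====

-- B replaces A's hash-map count accumulation (+ sort of the items) by sort-all-signals-then-group-runs; objective: alternative (same cost class, different algorithm).

-- shared trivial helpers (boilerplate, not the algorithm)
def pvGetSignal (row : List (String × String)) : String :=
  (PySem.Dict.ofList row).getD "signal" "UNKNOWN"

def pvHeader : List String :=
  [ "## 1. Market / Signal State",
    "",
    "Dashboard v0 does not make a new market regime decision.",
    "It summarizes current candidate output only.",
    "",
    "### Candidate Signal Counts",
    "" ]

-- ===== PORT A =====
def build_market_state_section (candidates : List (List (String × String))) : String :=
  let signal_counts : PySem.Dict String Int :=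
    candidates.foldl (fun d row =>
      let signal := pvGetSignal row
      d.insert signal (d.getD signal 0 + 1)) PySem.Dict.empty
  let lines := pvHeader
  let lines :=
    if signal_counts.items ≠ [] then
      (PySem.List.sorted2 signal_counts.items Prod.fst Prod.snd).foldl
        (fun ls p => ls ++ ["- " ++ p.1 ++ ": " ++ PySem.Int.toStr p.2]) lines
    else
      lines ++ ["- No candidates found"]
  PySem.Str.join "\n" lines

-- ===== PORT B =====
-- the run-length grouping loop of Source B: state (runs, cur, cnt) over the tail
def pvRuns (signals : List String) : List (String × Int) :=
  match signals with
  | [] => []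
  | x :: xs =>
    let st := xs.foldl
      (fun (st : List (String × Int) × String × Int) s =>
        if s = st.2.1 then (st.1, st.2.1, st.2.2 + 1)
        else (st.1 ++ [(st.2.1, st.2.2)], s, 1))
      ([], x, 1)
    st.1 ++ [(st.2.1, st.2.2)]

def build_market_state_section_alt (candidates : List (List (String × String))) : String :=
  let lines := pvHeader
  let signals := PySem.List.sorted (candidates.map pvGetSignal) (fun s => s)
  let runs := pvRuns signals
  let lines :=
    if runs ≠ [] then
      runs.foldl (fun ls p => ls ++ ["- " ++ p.1 ++ ": " ++ PySem.Int.toStr p.2]) lines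
    else
      lines ++ ["- No candidates found"]
  PySem.Str.join "\n" lines

-- ===== PRECONDITION & SPEC =====
def Spec_build_market_state_section (candidates : List (List (String × String))) (out : String) : Prop := out = build_market_state_section_alt candidates
instance (candidates : List (List (String × String))) (out : String) : Decidable (Spec_build_market_state_section candidates out) := by unfold Spec_build_market_state_section; infer_instance

-- ===== CLAIM (what is proved, stated in full; the proofs are below) =====
def Claim_equal_build_market_state_section : Prop := ∀ (candidates : List (List (String × String))), Dom_build_market_state_section candidates → Spec_build_market_state_section candidates (build_market_state_section candidates)

-- ===== LEMMAS AND PROOFS =====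

-- direct-recursion form of the run-length grouping (proof helper)
def pvRunsAux (x : String) (n : Int) : List String → List (String × Int)
  | [] => [(x, n)]
  | y :: ys => if y = x then pvRunsAux x (n + 1) ys else (x, n) :: pvRunsAux y 1 ys

theorem pvRuns_foldl_eq_aux (xs : List String) : ∀ (runs : List (String × Int)) (cur : String) (cnt : Int),
    (let st := xs.foldl
      (fun (st : List (String × Int) × String × Int) s =>
        if s = st.2.1 then (st.1, st.2.1, st.2.2 + 1)
        else (st.1 ++ [(st.2.1, st.2.2)], s, 1))
      (runs, cur, cnt)
     st.1 ++ [(st.2.1, st.2.2)]) = runs ++ pvRunsAux cur cnt xs := by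
  induction xs with
  | nil => intro runs cur cnt; simp [pvRunsAux]
  | cons y ys ih =>
    intro runs cur cnt
    by_cases h : y = cur
    · simp [List.foldl_cons, h, pvRunsAux, ih]
    · simp [List.foldl_cons, h, pvRunsAux, ih, List.append_assoc]

theorem pvRuns_cons (x : String) (xs : List String) :
    pvRuns (x :: xs) = pvRunsAux x 1 xs := by
  simpa [pvRuns] using pvRuns_foldl_eq_aux xs [] x 1

theorem pvRunsAux_mem (xs : List String) : ∀ (x : String) (n : Int) (p : String × Int),
    (∀ y ∈ xs, x ≤ y) → xs.Pairwise (· ≤ ·) →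
    (p ∈ pvRunsAux x n xs ↔
      p = (x, n + (xs.count x : Int)) ∨ (p.1 ∈ xs ∧ x < p.1 ∧ p.2 = (xs.count p.1 : Int))) := by
  induction xs with
  | nil => intro x n p _ _; simp [pvRunsAux]
  | cons y ys ih =>
    rintro x n ⟨p1, p2⟩ hge hpw
    rcases List.pairwise_cons.mp hpw with ⟨hy, hpw'⟩
    by_cases h : y = x
    · subst h
      rw [pvRunsAux, if_pos rfl, ih y (n + 1) ⟨p1, p2⟩ hy hpw']
      dsimp only
      constructor
      · rintro (h | ⟨h1, h2, h3⟩)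
        · left
          rw [Prod.mk.injEq] at h ⊢
          refine ⟨h.1, ?_⟩
          rw [h.2, List.count_cons_self]
          push_cast; ring
        · have hne : y ≠ p1 := ne_of_lt h2
          right
          exact ⟨List.mem_cons_of_mem _ h1, h2,
            by rw [List.count_cons_of_ne hne]; exact h3⟩
      · rintro (h | ⟨h1, h2, h3⟩)
        · left
          rw [Prod.mk.injEq] at h ⊢
          refine ⟨h.1, ?_⟩
          rw [h.2, List.count_cons_self]
          push_cast; ring
        · have hne : y ≠ p1 := ne_of_lt h2
          have h1' : p1 ∈ ys := by
            rcases List.mem_cons.mp h1 with he | h'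
            · exact absurd he.symm hne
            · exact h'
          right
          refine ⟨h1', h2, ?_⟩
          rw [List.count_cons_of_ne hne] at h3
          exact h3
    · -- y ≠ x, and x ≤ y, so x < y; x not in y :: ys
      have hxy : x < y := lt_of_le_of_ne (hge y List.mem_cons_self) (fun he => h he.symm)
      have hx_not : x ∉ y :: ys := by
        intro hmem
        rcases List.mem_cons.mp hmem with he | hmem'
        · exact h he.symm
        · exact absurd (hy x hmem') (not_le.mpr hxy)
      rw [pvRunsAux, if_neg h]
      have hcount0 : (((y :: ys).count x : Nat) : Int) = 0 := by
        simp [List.count_eq_zero_of_not_mem hx_not]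
      rw [List.mem_cons, ih y 1 ⟨p1, p2⟩ hy hpw']
      dsimp only
      constructor
      · rintro (he | h' | ⟨h1, h2, h3⟩)
        · left; rw [he, Prod.mk.injEq]; exact ⟨rfl, by rw [hcount0]; ring⟩
        · right
          rw [Prod.mk.injEq] at h'
          refine ⟨h'.1 ▸ List.mem_cons_self, h'.1 ▸ hxy, ?_⟩
          rw [h'.2, h'.1, List.count_cons_self]
          push_cast; ring
        · have hne : y ≠ p1 := ne_of_lt h2
          right
          exact ⟨List.mem_cons_of_mem _ h1, lt_trans hxy h2,
            by rw [List.count_cons_of_ne hne]; exact h3⟩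
      · rintro (he | ⟨h1, h2, h3⟩)
        · left
          rw [Prod.mk.injEq] at he ⊢
          exact ⟨he.1, by rw [he.2, hcount0]; ring⟩
        · by_cases hpy : p1 = y
          · right; left
            rw [Prod.mk.injEq]
            refine ⟨hpy, ?_⟩
            rw [h3, hpy, List.count_cons_self]
            push_cast; ring
          · right; right
            have h1' : p1 ∈ ys := by
              rcases List.mem_cons.mp h1 with he' | h'
              · exact absurd he' hpy
              · exact h'
            refine ⟨h1', lt_of_le_of_ne (hy p1 h1') (fun he' => hpy he'.symm), ?_⟩
            rw [List.count_cons_of_ne (fun he' => hpy he'.symm)] at h3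
            exact h3

theorem pvRunsAux_pairwise (xs : List String) : ∀ (x : String) (n : Int),
    (∀ y ∈ xs, x ≤ y) → xs.Pairwise (· ≤ ·) →
    (pvRunsAux x n xs).Pairwise (fun a b => a.1 < b.1) := by
  induction xs with
  | nil => intro x n _ _; simp [pvRunsAux]
  | cons y ys ih =>
    intro x n hge hpw
    rcases List.pairwise_cons.mp hpw with ⟨hy, hpw'⟩
    by_cases h : y = x
    · subst h; rw [pvRunsAux, if_pos rfl]; exact ih y (n + 1) hy hpw'
    · have hxy : x < y := lt_of_le_of_ne (hge y (List.mem_cons_self)) (fun he => h he.symm)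
      rw [pvRunsAux, if_neg h]
      refine List.pairwise_cons.mpr ⟨?_, ih y 1 hy hpw'⟩
      intro q hq
      rw [pvRunsAux_mem ys y 1 q hy hpw'] at hq
      rcases hq with rfl | ⟨_, h2, _⟩
      · exact hxy
      · exact lt_trans hxy h2

-- insertion-sort comparator congruence
theorem insertBy_congr {α : Type} (f g : α → α → Bool) (x : α) (ys : List α)
    (h : ∀ y ∈ ys, f x y = g x y) :
    PySem.List.insertBy f x ys = PySem.List.insertBy g x ys := by
  induction ys with
  | nil => rfl
  | cons y ys ih =>
    rw [PySem.List.insertBy, PySem.List.insertBy, h y List.mem_cons_self]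
    by_cases hb : g x y = true
    · simp [hb]
    · simp only [Bool.not_eq_true] at hb
      simp [hb, ih (fun z hz => h z (List.mem_cons_of_mem _ hz))]

theorem foldl_insertBy_congr {α : Type} (f g : α → α → Bool) (L : List α)
    (h : ∀ a ∈ L, ∀ b ∈ L, f a b = g a b) :
    ∀ (xs acc : List α), (∀ a ∈ xs, a ∈ L) → (∀ a ∈ acc, a ∈ L) →
      xs.foldl (fun a x => PySem.List.insertBy f x a) acc
        = xs.foldl (fun a x => PySem.List.insertBy g x a) acc := by
  intro xs
  induction xs with
  | nil => intro acc _ _; rfl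
  | cons x xs ih =>
    intro acc hxs hacc
    have hx : x ∈ L := hxs x List.mem_cons_self
    rw [List.foldl_cons, List.foldl_cons,
      insertBy_congr f g x acc (fun y hy => h x hx y (hacc y hy)),
      ih (PySem.List.insertBy g x acc) (fun a ha => hxs a (List.mem_cons_of_mem _ ha))
        (fun a ha => by
          rcases (PySem.List.mem_insertBy g x a acc).mp ha with rfl | ha'
          · exact hx
          · exact hacc a ha')]

-- sorted2 by (fst, snd) = sorted by fst, when fst determines the element within the list
theorem sorted2_eq_sorted_fst (items : List (String × Int))
    (hinj : ∀ p ∈ items, ∀ q ∈ items, p.1 = q.1 → p = q) :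
    PySem.List.sorted2 items Prod.fst Prod.snd = PySem.List.sorted items Prod.fst := by
  show items.foldl (fun a x => PySem.List.insertBy _ x a) []
      = items.foldl (fun a x => PySem.List.insertBy _ x a) []
  apply foldl_insertBy_congr _ _ items _ items [] (fun a ha => ha) (by simp)
  intro a ha b hb
  by_cases he : a.1 = b.1
  · have : a = b := hinj a ha b hb he
    subst this
    simp
  · rcases lt_or_gt_of_ne (he : a.1 ≠ b.1) with hlt | hgt
    · simp [hlt, asymm hlt]
    · simp [hgt, not_lt_of_gt hgt]

-- the append-loop is header ++ map
theorem foldl_append_map (f : String × Int → String) :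
    ∀ (l : List (String × Int)) (acc : List String),
      l.foldl (fun ls p => ls ++ [f p]) acc = acc ++ l.map f := by
  intro l
  induction l with
  | nil => intro acc; simp
  | cons p l ih => intro acc; simp [ih]

-- A's counting loop over candidates is Counter of the signal list
theorem counts_eq_counter (candidates : List (List (String × String))) :
    candidates.foldl (fun d row =>
        let signal := pvGetSignal row
        d.insert signal (d.getD signal 0 + 1)) PySem.Dict.empty
      = PySem.Dict.counter (candidates.map pvGetSignal) := by
  rw [← PySem.Dict.foldl_insert_getD_add_one_eq_counter, List.foldl_map]

-- main list-level identity: sorted2 of Counter items = run-length groups of the sorted signal list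
theorem sorted_items_eq_runs (sigs : List String) (hne : sigs ≠ []) :
    PySem.List.sorted2 (PySem.Dict.counter sigs).items Prod.fst Prod.snd
      = pvRuns (PySem.List.sorted sigs (fun s => s)) := by
  have hitems : (PySem.Dict.counter sigs).items
      = (PySem.Set.ofList sigs : List String).map (fun k => (k, (sigs.count k : Int))) :=
    PySem.Dict.items_counter sigs
  -- the sorted signal list
  set t := PySem.List.sorted sigs (fun s => s) with ht
  obtain ⟨x, xs, hx⟩ : ∃ x xs, t = x :: xs := by
    cases htl : t with
    | nil => exact absurd ((PySem.List.sorted_eq_nil_iff sigs (fun s => s) false).mp htl) hne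
    | cons a l => exact ⟨a, l, rfl⟩
  have htperm : t.Perm sigs := PySem.List.sorted_perm sigs (fun s => s) false
  have htpw : t.Pairwise (· ≤ ·) := PySem.List.sorted_pairwise sigs (fun s => s)
  rw [hx] at htpw
  rcases List.pairwise_cons.mp htpw with ⟨hxle, hxspw⟩
  have hruns : pvRuns t = pvRunsAux x 1 xs := by rw [hx]; exact pvRuns_cons x xs
  -- membership characterisation of the runs
  have hmem : ∀ p : String × Int,
      p ∈ pvRuns t ↔ p.1 ∈ sigs ∧ p.2 = (sigs.count p.1 : Int) := by
    intro p
    rw [hruns, pvRunsAux_mem xs x 1 p hxle hxspw]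
    have hcnt : ∀ s : String, ((x :: xs).count s : Int) = (sigs.count s : Int) := by
      intro s
      have h := htperm.count_eq s
      rw [hx] at h
      exact_mod_cast h
    have hmemt : ∀ s : String, s ∈ x :: xs ↔ s ∈ sigs := by
      intro s
      constructor
      · intro hs; exact htperm.mem_iff.mp (hx ▸ hs)
      · intro hs; have := htperm.mem_iff.mpr hs; rw [hx] at this; exact this
    constructor
    · rintro (rfl | ⟨h1, hlt, h3⟩)
      · refine ⟨(hmemt x).mp List.mem_cons_self, ?_⟩
        rw [← hcnt x, List.count_cons_self]
        push_cast
        ring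
      · refine ⟨(hmemt p.1).mp (List.mem_cons_of_mem _ h1), ?_⟩
        rw [h3, ← hcnt p.1, List.count_cons_of_ne (ne_of_lt hlt)]
    · rintro ⟨h1, h2⟩
      by_cases hpx : p.1 = x
      · left
        have hp : p = (p.1, p.2) := rfl
        rw [hp, hpx, h2, ← hcnt p.1, hpx, List.count_cons_self]
        push_cast
        congr 1
        ring
      · right
        have hmem' : p.1 ∈ x :: xs := (hmemt p.1).mpr h1
        have h1' : p.1 ∈ xs := by
          rcases List.mem_cons.mp hmem' with he | h'
          · exact absurd he hpx
          · exact h'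
        refine ⟨h1', lt_of_le_of_ne (hxle p.1 h1') (fun he => hpx he.symm), ?_⟩
        rw [h2, ← hcnt p.1, List.count_cons_of_ne (fun he => hpx he.symm)]
  have hpair : (pvRuns t).Pairwise (fun a b => a.1 < b.1) := by
    rw [hruns]; exact pvRunsAux_pairwise xs x 1 hxle hxspw
  have hnodup_runs : (pvRuns t).Nodup :=
    hpair.imp (fun h => by intro he; rw [he] at h; exact lt_irrefl _ h)
  have hnodup_items : ((PySem.Dict.counter sigs).items).Nodup := by
    rw [hitems]
    exact (PySem.Set.nodup_ofList sigs).map (fun a b hab => (Prod.mk.injEq _ _ _ _ ▸ hab : _ ∧ _).1)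
  have hmem_items : ∀ p : String × Int,
      p ∈ (PySem.Dict.counter sigs).items ↔ p.1 ∈ sigs ∧ p.2 = (sigs.count p.1 : Int) := by
    intro p
    rw [hitems, List.mem_map]
    constructor
    · rintro ⟨k, hk, rfl⟩
      exact ⟨(PySem.Set.mem_ofList sigs k).mp hk, rfl⟩
    · rintro ⟨h1, h2⟩
      exact ⟨p.1, (PySem.Set.mem_ofList sigs p.1).mpr h1, by rw [← h2]⟩
  have hperm : (pvRuns t).Perm ((PySem.Dict.counter sigs).items) :=
    (List.perm_ext_iff_of_nodup hnodup_runs hnodup_items).mpr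
      (fun p => (hmem p).trans (hmem_items p).symm)
  have hinj : ∀ p ∈ (PySem.Dict.counter sigs).items, ∀ q ∈ (PySem.Dict.counter sigs).items,
      p.1 = q.1 → p = q := by
    intro p hp q hq he
    rw [hmem_items] at hp hq
    have hp' : p = (p.1, p.2) := rfl
    rw [hp', hp.2, he, ← hq.2]
  rw [sorted2_eq_sorted_fst _ hinj]
  exact PySem.List.sorted_eq_of_perm_of_pairwise_lt _ _ Prod.fst hperm hpair

-- ===== VERDICT (by name: the statement is the Claim_ definition above) =====
theorem build_market_state_section_spec : Claim_equal_build_market_state_section := by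
  intro candidates _
  unfold Spec_build_market_state_section build_market_state_section build_market_state_section_alt
  set sigs := candidates.map pvGetSignal with hsigs
  rw [counts_eq_counter candidates]
  by_cases hne : sigs = []
  · -- no candidates: both take the "No candidates found" branch
    have h1 : (PySem.Dict.counter sigs).items = [] := by
      rw [PySem.Dict.items_counter, hne]; rfl
    have h2 : PySem.List.sorted sigs (fun s => s) = [] := by
      rw [hne]; rfl
    simp only [← hsigs, h1, h2]
    simp [pvRuns]
  · have h1 : (PySem.Dict.counter sigs).items ≠ [] := by
      rw [PySem.Dict.items_counter]
      intro hc
      rcases List.exists_mem_of_ne_nil sigs hne with ⟨s, hs⟩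
      have hm : s ∈ (PySem.Set.ofList sigs : List String) := (PySem.Set.mem_ofList sigs s).mpr hs
      have hm2 := List.mem_map_of_mem (f := fun k => (k, ((sigs.count k : Nat) : Int))) hm
      rw [hc] at hm2
      simp at hm2
    have h2 : pvRuns (PySem.List.sorted sigs (fun s => s)) ≠ [] := by
      have hlen := (sorted_items_eq_runs sigs hne)
      intro hc
      have := PySem.List.sorted2_perm (PySem.Dict.counter sigs).items Prod.fst Prod.snd false
      rw [hlen, hc] at this
      exact h1 (this.symm.eq_nil)
    simp only [← hsigs, if_pos h1, if_pos h2]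
    rw [foldl_append_map, foldl_append_map, sorted_items_eq_runs sigs hne]
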